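-- pv_equiv track=rewrite | github.com/cwt/neosqlite | neosqlite/collection/query_helper/aggregation.py | _find_parent_unwind
-- ===== SOURCE A (Python) =====
-- def _find_parent_unwind(
--     field_name: str, unwound_fields: dict[str, str]
-- ) -> tuple[str | None, str | None]:
--     """
--     Find the parent unwind field for a nested unwind.
--
--     This method searches through already processed unwind fields to find a
--     parent field that the current field is nested within. This is used to
--     properly construct SQL joins for nested array unwinding operations.
--
--     Args:
--         field_name (str): The field name to find the parent for.
--         unwound_fields (dict[str, str]): A dictionary mapping field paths to
--                                          their aliases.
--
--     Returns:
--         tuple[str | None, str | None]: A tuple containing the parent field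
--                                        name and its alias, or (None, None)
--                                        if no parent is found.
--     """
--     parent_field = None
--     parent_alias = None
--     longest_match_len = -1
--
--     for p_field, p_alias in unwound_fields.items():
--         prefix = p_field + "."
--         if field_name.startswith(prefix):
--             if len(p_field) > longest_match_len:
--                 longest_match_len = len(p_field)
--                 parent_field = p_field
--                 parent_alias = p_alias
--     return parent_field, parent_alias
-- ===== SOURCE B (Python) =====
-- def _find_parent_unwind(
--     field_name: str, unwound_fields: dict[str, str]
-- ) -> tuple[str | None, str | None]:
--     """Scan field_name's dot boundaries left-to-right; each prefix before a dot
--     is looked up directly in unwound_fields, so the longest present prefix is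
--     the last hit (no scan over the unwound fields)."""
--     parent_field = None
--     parent_alias = None
--     for i, ch in enumerate(field_name):
--         if ch == ".":
--             candidate = field_name[:i]
--             alias = unwound_fields.get(candidate)
--             if alias is not None:
--                 parent_field = candidate
--                 parent_alias = alias
--     return parent_field, parent_alias
-- ===== Notes on version B (the rewrite author's own statement) =====
-- stated objective: alternative
-- what changed: Instead of scanning every unwound field and testing it as a prefix of field_name, B enumerates the dot-boundary prefixes of field_name and dict-looks each one up, keeping the last (longest) hit.
import Mathlib
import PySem

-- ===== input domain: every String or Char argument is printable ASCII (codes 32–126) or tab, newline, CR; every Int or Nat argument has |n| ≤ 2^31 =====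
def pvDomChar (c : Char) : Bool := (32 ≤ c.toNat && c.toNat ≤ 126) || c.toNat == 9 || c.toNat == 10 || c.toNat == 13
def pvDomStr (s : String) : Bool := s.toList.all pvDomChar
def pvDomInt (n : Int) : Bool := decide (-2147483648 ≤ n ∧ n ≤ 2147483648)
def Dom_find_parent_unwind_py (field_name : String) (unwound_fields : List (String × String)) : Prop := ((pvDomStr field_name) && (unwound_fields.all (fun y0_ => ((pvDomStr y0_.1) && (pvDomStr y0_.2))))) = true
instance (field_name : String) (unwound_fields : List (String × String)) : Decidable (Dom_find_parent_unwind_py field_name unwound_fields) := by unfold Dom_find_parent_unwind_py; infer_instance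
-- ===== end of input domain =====

-- B replaces A's scan over all unwound fields by direct dict lookups of field_name's
-- dot-boundary prefixes, keeping the last (longest) hit (objective: alternative).

-- ===== PORT A =====
def find_parent_unwind_py (field_name : String) (unwound_fields : List (String × String)) : Option String × Option String :=
  let st := unwound_fields.foldl
    (fun (st : Option String × Option String × Int) e =>
      if PySem.Str.startswith field_name (e.1 ++ ".") then
        if PySem.Str.len e.1 > st.2.2 then (some e.1, some e.2, PySem.Str.len e.1)
        else st
      else st)
    (none, none, -1)
  (st.1, st.2.1)

-- ===== PORT B =====
def find_parent_unwind_py_alt (field_name : String) (unwound_fields : List (String × String)) : Option String × Option String :=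
  (PySem.List.enumerate field_name.toList 0).foldl
    (fun (st : Option String × Option String) p =>
      if p.2 = '.' then
        let candidate := String.ofList (field_name.toList.take p.1.toNat)
        match (PySem.Dict.mk unwound_fields).get? candidate with
        | some a => (some candidate, some a)
        | none => st
      else st)
    (none, none)

-- ===== PRECONDITION & SPEC =====
-- Pre_ excludes association lists with duplicate keys: those cannot come from a Python
-- dict (building the dict silently collapses them, so which entry survives is accidental).
def Pre_find_parent_unwind_py (field_name : String) (unwound_fields : List (String × String)) : Prop :=
  (unwound_fields.map Prod.fst).Nodup
instance (field_name : String) (unwound_fields : List (String × String)) : Decidable (Pre_find_parent_unwind_py field_name unwound_fields) := by unfold Pre_find_parent_unwind_py; infer_instance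

def pvWitness_find_parent_unwind_py : String × (List (String × String)) := ("a.b.c", [("a", "t1"), ("a.b", "t2")])

def Spec_find_parent_unwind_py (field_name : String) (unwound_fields : List (String × String)) (out : Option String × Option String) : Prop := out = find_parent_unwind_py_alt field_name unwound_fields
instance (field_name : String) (unwound_fields : List (String × String)) (out : Option String × Option String) : Decidable (Spec_find_parent_unwind_py field_name unwound_fields out) := by unfold Spec_find_parent_unwind_py; infer_instance

-- ===== CLAIM (what is proved, stated in full; the proofs are below) =====
def Claim_equal_find_parent_unwind_py : Prop := ∀ (field_name : String) (unwound_fields : List (String × String)), Dom_find_parent_unwind_py field_name unwound_fields → Pre_find_parent_unwind_py field_name unwound_fields → Spec_find_parent_unwind_py field_name unwound_fields (find_parent_unwind_py field_name unwound_fields)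

-- ===== LEMMAS AND PROOFS =====

-- abstraction of A's fold state: the current best entry (none = nothing matched yet)
def pvPickStep (fn : String) (acc : Option (String × String)) (e : String × String) : Option (String × String) :=
  if PySem.Str.startswith fn (e.1 ++ ".") ∧ (acc.elim (-1) (fun b => PySem.Str.len b.1)) < PySem.Str.len e.1
  then some e else acc

def pvPick (fn : String) (l : List (String × String)) (acc : Option (String × String)) : Option (String × String) :=
  l.foldl (pvPickStep fn) acc

def pvEmbed (acc : Option (String × String)) : Option String × Option String × Int :=
  acc.elim (none, none, -1) (fun b => (some b.1, some b.2, PySem.Str.len b.1))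

lemma pvLen_nonneg (s : String) : 0 ≤ PySem.Str.len s := by
  rw [PySem.Str.len_eq]; exact_mod_cast Int.natCast_nonneg _

lemma pvEmbed_step (fn : String) (acc : Option (String × String)) (e : String × String) :
    (fun (st : Option String × Option String × Int) e =>
      if PySem.Str.startswith fn (e.1 ++ ".") then
        if PySem.Str.len e.1 > st.2.2 then (some e.1, some e.2, PySem.Str.len e.1)
        else st
      else st) (pvEmbed acc) e = pvEmbed (pvPickStep fn acc e) := by
  cases acc <;> simp [pvEmbed, pvPickStep] <;> split_ifs <;> simp_all

lemma pvA_eq_pick (fn : String) (l : List (String × String)) (acc : Option (String × String)) :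
    l.foldl (fun (st : Option String × Option String × Int) e =>
      if PySem.Str.startswith fn (e.1 ++ ".") then
        if PySem.Str.len e.1 > st.2.2 then (some e.1, some e.2, PySem.Str.len e.1)
        else st
      else st) (pvEmbed acc) = pvEmbed (pvPick fn l acc) := by
  induction l generalizing acc with
  | nil => rfl
  | cons e t ih => simp only [List.foldl_cons, pvPick, pvEmbed_step]; exact ih _

-- characterisation of `startswith fn (k ++ ".")` on the char-list side
lemma pvPrefixDot (cs k : List Char) :
    (k ++ ['.']) <+: cs ↔ cs.take k.length = k ∧ cs[k.length]? = some '.' := by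
  constructor
  · rintro ⟨t, ht⟩
    have ht' : cs = k ++ '.' :: t := by rw [← ht]; simp
    subst ht'
    refine ⟨List.take_left, ?_⟩
    rw [List.getElem?_append_right le_rfl]
    simp
  · rintro ⟨h1, h2⟩
    have hlt : k.length < cs.length := (List.getElem?_eq_some_iff.mp h2).1
    have hd : cs[k.length] = '.' := by
      have := (List.getElem?_eq_some_iff.mp h2).2; exact this
    have hcs : cs = k ++ '.' :: cs.drop (k.length + 1) := by
      conv_lhs => rw [← List.take_append_drop k.length cs, List.drop_eq_getElem_cons hlt]
      rw [h1, hd]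
    exact ⟨cs.drop (k.length + 1), by rw [hcs]; simp⟩

lemma pvSw_iff (fn : String) (k : String) :
    PySem.Str.startswith fn (k ++ ".") = true ↔
      fn.toList.take k.toList.length = k.toList ∧ fn.toList[k.toList.length]? = some '.' := by
  rw [PySem.Str.startswith_eq, PySem.Chars.startswith_iff, String.toList_append,
    show (".".toList) = ['.'] from by decide, pvPrefixDot]

lemma pvPick_none (fn : String) (l : List (String × String)) (acc : Option (String × String))
    (h : pvPick fn l acc = none) :
    acc = none ∧ ∀ e ∈ l, ¬ PySem.Str.startswith fn (e.1 ++ ".") = true := by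
  induction l generalizing acc with
  | nil => exact ⟨h, by simp⟩
  | cons e t ih =>
    obtain ⟨hstep, hrest⟩ := ih (pvPickStep fn acc e) h
    unfold pvPickStep at hstep
    by_cases hc : PySem.Str.startswith fn (e.1 ++ ".") = true ∧ (acc.elim (-1) fun b => PySem.Str.len b.1) < PySem.Str.len e.1
    · rw [if_pos hc] at hstep; exact absurd hstep (Option.some_ne_none e)
    · rw [if_neg hc] at hstep
      subst hstep
      refine ⟨rfl, ?_⟩
      intro e' he' hsw
      rcases List.mem_cons.mp he' with rfl | hm
      · exact hc ⟨hsw, by simpa using lt_of_lt_of_le (by norm_num) (pvLen_nonneg e'.1)⟩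
      · exact hrest e' hm hsw

lemma pvPick_some (fn : String) (l : List (String × String)) (acc : Option (String × String))
    (b : String × String) (h : pvPick fn l acc = some b) :
    (acc = some b ∨ (b ∈ l ∧ PySem.Str.startswith fn (b.1 ++ ".") = true)) ∧
    (∀ b0, acc = some b0 → PySem.Str.len b0.1 ≤ PySem.Str.len b.1) ∧
    (∀ e ∈ l, PySem.Str.startswith fn (e.1 ++ ".") = true → PySem.Str.len e.1 ≤ PySem.Str.len b.1) := by
  induction l generalizing acc with
  | nil =>
    unfold pvPick at h
    simp only [List.foldl_nil] at h
    refine ⟨Or.inl h, fun b0 hb0 => ?_, by simp⟩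
    rw [h] at hb0; cases hb0; exact le_rfl
  | cons e t ih =>
    obtain ⟨hmem, hacc, hmax⟩ := ih (pvPickStep fn acc e) h
    unfold pvPickStep at hmem hacc
    split_ifs at hmem hacc with hc
    · refine ⟨?_, fun b0 hb0 => ?_, fun e' he' hsw => ?_⟩
      · rcases hmem with he | hm
        · cases he; exact Or.inr ⟨List.mem_cons_self, hc.1⟩
        · exact Or.inr ⟨List.mem_cons_of_mem _ hm.1, hm.2⟩
      · subst hb0
        have h1 : PySem.Str.len b0.1 < PySem.Str.len e.1 := by simpa using hc.2
        exact le_of_lt (lt_of_lt_of_le h1 (hacc e rfl))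
      · rcases List.mem_cons.mp he' with rfl | hm
        · exact hacc e' rfl
        · exact hmax e' hm hsw
    · refine ⟨?_, hacc, fun e' he' hsw => ?_⟩
      · rcases hmem with he | hm
        · exact Or.inl he
        · exact Or.inr ⟨List.mem_cons_of_mem _ hm.1, hm.2⟩
      · rcases List.mem_cons.mp he' with rfl | hm
        · cases hacc' : acc with
          | none =>
            exfalso
            exact hc ⟨hsw, by rw [hacc']; simpa using lt_of_lt_of_le (by norm_num) (pvLen_nonneg e'.1)⟩
          | some b0 =>
            have h1 : PySem.Str.len e'.1 ≤ PySem.Str.len b0.1 := by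
              by_contra hlt
              exact hc ⟨hsw, by rw [hacc']; simpa using lt_of_not_ge hlt⟩
            exact le_trans h1 (hacc b0 hacc')
        · exact hmax e' hm hsw

-- last-hit shape of B's fold
lemma pvFoldl_lastHit {α β : Type} (p : α → Bool) (g : α → β) (l : List α) (a : β) :
    l.foldl (fun acc x => if p x then g x else acc) a = ((l.filter p).getLast?).elim a g := by
  induction l generalizing a with
  | nil => rfl
  | cons x t ih =>
    simp only [List.foldl_cons, List.filter_cons]
    by_cases hx : p x
    · simp only [hx, if_true, ih]
      cases hfl : t.filter p with
      | nil => simp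
      | cons y u =>
        rw [List.getLast?_cons_cons]
        cases hz : (y :: u).getLast? with
        | none => simp at hz
        | some z => rfl
    · simp only [hx, Bool.false_eq_true, if_false, ih]

def pvHit (fn : String) (d : List (String × String)) (q : Int × Char) : Bool :=
  (q.2 = '.') && ((PySem.Dict.mk d).get? (String.ofList (fn.toList.take q.1.toNat))).isSome

def pvOut (fn : String) (d : List (String × String)) (q : Int × Char) : Option String × Option String :=
  (some (String.ofList (fn.toList.take q.1.toNat)),
   (PySem.Dict.mk d).get? (String.ofList (fn.toList.take q.1.toNat)))

lemma pvB_eq (fn : String) (d : List (String × String)) :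
    find_parent_unwind_py_alt fn d =
      (((PySem.List.enumerate fn.toList 0).filter (pvHit fn d)).getLast?).elim
        (none, none) (pvOut fn d) := by
  unfold find_parent_unwind_py_alt
  rw [show (fun (st : Option String × Option String) p =>
      if p.2 = '.' then
        let candidate := String.ofList (fn.toList.take p.1.toNat)
        match (PySem.Dict.mk d).get? candidate with
        | some a => (some candidate, some a)
        | none => st
      else st) = (fun acc q => if pvHit fn d q then pvOut fn d q else acc) from ?_,
    pvFoldl_lastHit]
  funext st q
  by_cases hq : q.2 = '.'
  · cases hg : (PySem.Dict.mk d).get? (String.ofList (fn.toList.take q.1.toNat)) <;>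
      simp [hq, hg, pvHit, pvOut]
  · simp [hq, pvHit]

-- ===== VERDICT (by name: the statement is the Claim_ definition above) =====
theorem find_parent_unwind_py_spec : Claim_equal_find_parent_unwind_py := by
  intro fn d _hdom hpre
  unfold Spec_find_parent_unwind_py
  have hnodup : (PySem.Dict.mk d).keys.Nodup := by
    rw [PySem.Dict.keys_mk]; exact hpre
  -- rewrite A through the pick abstraction
  have hA : find_parent_unwind_py fn d =
      ((pvEmbed (pvPick fn d none)).1, (pvEmbed (pvPick fn d none)).2.1) := by
    unfold find_parent_unwind_py
    rw [show ((none, none, -1) : Option String × Option String × Int) = pvEmbed none from rfl,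
      pvA_eq_pick]
  rw [hA, pvB_eq]
  -- a hit in the enumerate list yields a matching entry of d
  have hit_entry : ∀ q ∈ (PySem.List.enumerate fn.toList 0).filter (pvHit fn d),
      ∃ (k : Nat) (a : String), k < fn.toList.length ∧ q.1 = (k : Int) ∧
        (PySem.Dict.mk d).get? (String.ofList (fn.toList.take k)) = some a ∧
        (String.ofList (fn.toList.take k), a) ∈ d ∧
        PySem.Str.startswith fn (String.ofList (fn.toList.take k) ++ ".") = true := by
    intro q hq
    have hqe := List.mem_filter.mp hq
    obtain ⟨k, hk, hqk⟩ := (PySem.List.mem_enumerate_iff _ _ _).mp hqe.1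
    have hhit := hqe.2
    unfold pvHit at hhit
    rw [hqk] at hhit ⊢
    simp only [zero_add] at hhit ⊢
    have hdot : fn.toList[k] = '.' := by simpa using (Bool.and_elim_left hhit)
    have hsome := Bool.and_elim_right hhit
    simp only [Int.toNat_natCast] at hsome ⊢
    cases hg : (PySem.Dict.mk d).get? (String.ofList (fn.toList.take k)) with
    | none => rw [hg] at hsome; simp at hsome
    | some a =>
      refine ⟨k, a, hk, rfl, hg, PySem.Dict.mem_items_of_get?_eq_some _ hg, ?_⟩
      rw [pvSw_iff]
      have htk : (String.ofList (fn.toList.take k)).toList = fn.toList.take k :=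
        String.toList_ofList
      rw [htk]
      have hlen : (fn.toList.take k).length = k := by
        rw [List.length_take]; omega
      rw [hlen]
      refine ⟨rfl, ?_⟩
      rw [List.getElem?_eq_getElem hk, hdot]
  cases hp : pvPick fn d none with
  | none =>
    obtain ⟨-, hno⟩ := pvPick_none fn d none hp
    have hfil : (PySem.List.enumerate fn.toList 0).filter (pvHit fn d) = [] := by
      rw [List.eq_nil_iff_forall_not_mem]
      intro q hq
      obtain ⟨k, a, hk, -, -, hmem, hsw⟩ := hit_entry q hq
      exact hno _ hmem hsw
    rw [hfil]
    rfl
  | some b =>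
    obtain ⟨hmem, -, hmax⟩ := pvPick_some fn d none b hp
    rcases hmem with hbad | ⟨hbd, hbsw⟩
    · exact absurd hbad (by simp)
    -- decode b's match
    obtain ⟨htake, hidx⟩ := (pvSw_iff fn b.1).mp hbsw
    set n := b.1.toList.length with hn
    have hnlt : n < fn.toList.length := (List.getElem?_eq_some_iff.mp hidx).1
    have hdotn : fn.toList[n] = '.' := (List.getElem?_eq_some_iff.mp hidx).2
    have hofl : String.ofList (fn.toList.take n) = b.1 := by
      rw [htake]; exact String.ofList_toList
    have hgetb : (PySem.Dict.mk d).get? (String.ofList (fn.toList.take n)) = some b.2 := by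
      rw [hofl]
      exact PySem.Dict.get?_of_mem_items _ hbd hnodup
    -- the position n is a hit
    have hq0 : ((n : Int), '.') ∈ (PySem.List.enumerate fn.toList 0).filter (pvHit fn d) := by
      rw [List.mem_filter]
      constructor
      · rw [PySem.List.mem_enumerate_iff]
        exact ⟨n, hnlt, by rw [hdotn]; simp⟩
      · unfold pvHit
        simp only [Int.toNat_natCast]
        rw [hgetb]
        simp
    -- so the filtered list has a last element q
    cases hL : ((PySem.List.enumerate fn.toList 0).filter (pvHit fn d)).getLast? with
    | none =>
      rw [List.getLast?_eq_none_iff.mp hL] at hq0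
      simp at hq0
    | some q =>
      obtain ⟨k, a, hk, hq1, hget, hqd, hqsw⟩ :=
        hit_entry q (List.mem_of_getLast? hL)
      -- k ≤ n by A-maximality
      have hkn : k ≤ n := by
        have := hmax _ hqd hqsw
        rw [PySem.Str.len_eq, PySem.Str.len_eq, String.toList_ofList, List.length_take] at this
        omega
      -- n ≤ k since q is the last hit and position n is a hit
      have hnk : n ≤ k := by
        obtain ⟨l', hl'⟩ := List.getLast?_eq_some_iff.mp hL
        have hpair : (((PySem.List.enumerate fn.toList 0).filter (pvHit fn d))).Pairwise
            (fun p q => p.1 < q.1) :=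
          List.Pairwise.sublist List.filter_sublist (PySem.List.pairwise_lt_enumerate _ _)
        rw [hl'] at hq0 hpair
        rcases List.mem_append.mp hq0 with hmem' | hmem'
        · have hlt := (List.pairwise_append.mp hpair).2.2 _ hmem' q (by simp)
          rw [hq1] at hlt
          have hlt' : (n : Int) < (k : Int) := by simpa using hlt
          omega
        · have : ((n : Int), '.') = q := by simpa using hmem'
          rw [← this] at hq1
          have : (n : Int) = (k : Int) := by simpa using hq1
          omega
      have hkeq : k = n := le_antisymm hkn hnk
      subst hkeq
      -- both sides are (some b.1, some b.2)
      simp only [Option.elim_some]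
      unfold pvOut
      rw [hq1]
      simp only [Int.toNat_natCast]
      rw [hgetb, hofl]
      simp [pvEmbed]
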